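-- pv_equiv track=rewrite | github.com/01ArmanSardar/PYTHON | week 01-Introduction to python/Module--4--Assignment 01/minimzie_number.py | max_oprt
-- ===== SOURCE A (Python) =====
-- def max_oprt(N, A):
--     max_ops=0
--     while all (x%2==0 for x in A):
--         index=0
--         while index<len(A):
--             A[index] =A[index]//2
--             index +=1
--         max_ops +=1
--     return max_ops
-- ===== SOURCE B (Python) =====
-- def max_oprt(N, A):
--     # Single pass: the answer is the minimum number of trailing factors of 2
--     # over the nonzero elements (zeros stay even forever and never limit it).
--     # Does not mutate A (A mutates its argument in place; return value is the same).
--     best = None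
--     for x in A:
--         if x != 0:
--             t = 0
--             while x % 2 == 0:
--                 x //= 2
--                 t += 1
--             best = t if best is None else min(best, t)
--     return best
-- ===== Notes on version B (the rewrite author's own statement) =====
-- stated objective: alternative
-- what changed: Instead of repeatedly halving the whole list once per all-even round, B makes a single pass taking the minimum trailing-factor-of-2 count over the nonzero elements.
import Mathlib
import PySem

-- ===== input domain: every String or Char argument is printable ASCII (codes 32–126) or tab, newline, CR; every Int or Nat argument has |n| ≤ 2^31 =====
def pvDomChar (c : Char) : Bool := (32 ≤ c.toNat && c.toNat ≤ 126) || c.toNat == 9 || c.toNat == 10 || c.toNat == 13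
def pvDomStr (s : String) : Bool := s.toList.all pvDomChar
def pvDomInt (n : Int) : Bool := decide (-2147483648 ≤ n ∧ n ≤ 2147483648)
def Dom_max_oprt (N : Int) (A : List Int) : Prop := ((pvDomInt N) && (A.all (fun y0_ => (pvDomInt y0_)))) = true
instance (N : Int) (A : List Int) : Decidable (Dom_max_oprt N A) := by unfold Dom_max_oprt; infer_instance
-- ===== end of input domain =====

-- B replaces A's repeated whole-list halving rounds by a single pass taking the minimum
-- trailing-factor-of-2 count over the nonzero elements (alternative algorithm, similar cost).
-- A mutates its argument list in place (halves elements); B does not: the equivalence proved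
-- here is about the return value only.

-- ===== PORT A =====
-- inner 'while index < len(A): A[index] = A[index]//2' — rewrites each element in order
def pvHalveAll : List Int → List Int
  | [] => []
  | x :: xs => PySem.Int.floordiv x 2 :: pvHalveAll xs

-- outer 'while all(x%2==0 for x in A)'; fuel makes the loop total — under Dom (|x| ≤ 2^31)
-- and Pre_ (some nonzero element) the loop runs at most 31 times, so fuel 64 is never exhausted.
def pvOuter : Nat → List Int → Int → Int
  | 0, _, max_ops => max_ops
  | fuel + 1, A, max_ops =>
    if A.all (fun x => PySem.Int.mod x 2 == 0) then
      pvOuter fuel (pvHalveAll A) (max_ops + 1)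
    else max_ops

def max_oprt (N : Int) (A : List Int) : Int := pvOuter 64 A 0

-- ===== PORT B =====
-- 'while x % 2 == 0: x //= 2; t += 1' — same fuel argument as above (nonzero |x| ≤ 2^31)
def pvTwos : Nat → Int → Int → Int
  | 0, _, t => t
  | fuel + 1, x, t =>
    if PySem.Int.mod x 2 == 0 then pvTwos fuel (PySem.Int.floordiv x 2) (t + 1) else t

-- 'for x in A: …' with the running best (None before the first nonzero element)
def pvBest : List Int → Option Int → Option Int
  | [], best => best
  | x :: xs, best =>
    if x ≠ 0 then
      let t := pvTwos 64 x 0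
      pvBest xs (some (match best with | none => t | some b => min b t))
    else pvBest xs best

def max_oprt_alt (N : Int) (A : List Int) : Int := (pvBest A none).getD 0

-- ===== PRECONDITION & SPEC =====
-- Pre_ excludes exactly the inputs on which the Python A loops forever (empty list or
-- all elements zero: then every element stays even and the while never exits);
-- B returns None (not an int) there, so those inputs are outside the claim.
def Pre_max_oprt (N : Int) (A : List Int) : Prop := ∃ x ∈ A, x ≠ 0
instance (N : Int) (A : List Int) : Decidable (Pre_max_oprt N A) := by unfold Pre_max_oprt; infer_instance
def pvWitness_max_oprt : Int × List Int := (3, [4, 6, 0])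

def Spec_max_oprt (N : Int) (A : List Int) (out : Int) : Prop := out = max_oprt_alt N A
instance (N : Int) (A : List Int) (out : Int) : Decidable (Spec_max_oprt N A out) := by unfold Spec_max_oprt; infer_instance

-- ===== CLAIM (what is proved, stated in full; the proofs are below) =====
def Claim_equal_max_oprt : Prop := ∀ (N : Int) (A : List Int), Dom_max_oprt N A → Pre_max_oprt N A → Spec_max_oprt N A (max_oprt N A)

-- ===== LEMMAS AND PROOFS =====

-- number of trailing factors of 2 (mathematical reference value)
def pvT2 (x : Int) : Nat :=
  if h : x ≠ 0 ∧ x % 2 = 0 then pvT2 (x / 2) + 1 else 0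
termination_by x.natAbs
decreasing_by
  rcases h with ⟨hx, he⟩
  omega

theorem pvT2_eq (x : Int) :
    pvT2 x = if x ≠ 0 ∧ x % 2 = 0 then pvT2 (x / 2) + 1 else 0 := by
  rw [pvT2]; split <;> simp_all


theorem pow_pvT2_le (x : Int) (hx : x ≠ 0) : 2 ^ pvT2 x ≤ x.natAbs := by
  fun_induction pvT2 x with
  | case1 x h ih =>
    have hx2 : x / 2 ≠ 0 := by omega
    have := ih hx2
    have : 2 ^ (pvT2 (x / 2) + 1) ≤ 2 * (x / 2).natAbs := by
      rw [pow_succ]; omega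
    omega
  | case2 x h =>
    simp only [pow_zero]; omega

theorem pvT2_lt_64 (x : Int) (hx : x ≠ 0) (hdom : pvDomInt x = true) : pvT2 x < 64 := by
  have h1 := pow_pvT2_le x hx
  have h2 : x.natAbs ≤ 2 ^ 31 := by
    simp only [pvDomInt, decide_eq_true_eq] at hdom; omega
  have h3 : 2 ^ pvT2 x ≤ 2 ^ 31 := le_trans h1 h2
  have := (Nat.pow_le_pow_iff_right (by norm_num : 1 < 2)).mp h3
  omega

-- pvTwos computes t + pvT2 x when fuel suffices
theorem pvTwos_eq (fuel : Nat) (x t : Int) (hx : x ≠ 0) (hf : pvT2 x < fuel) :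
    pvTwos fuel x t = t + (pvT2 x : Int) := by
  induction fuel generalizing x t with
  | zero => omega
  | succ f ih =>
    rw [pvTwos]
    rw [PySem.Int.mod_eq_emod_of_pos (by norm_num : (0:Int) < 2),
        PySem.Int.floordiv_eq_ediv_of_pos (by norm_num : (0:Int) < 2)]
    by_cases he : x % 2 = 0
    · have hx2 : x / 2 ≠ 0 := by omega
      have ht2 : pvT2 x = pvT2 (x / 2) + 1 := by rw [pvT2_eq]; simp [hx, he]
      have hf2 : pvT2 (x / 2) < f := by omega
      simp only [he, beq_self_eq_true, if_true]
      rw [ih (x / 2) (t + 1) hx2 hf2, ht2]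
      push_cast; ring
    · have ht2 : pvT2 x = 0 := by rw [pvT2_eq]; simp [he]
      simp [he, ht2]

-- min over nonzero elements, in spec form
def pvM? : List Int → Option Nat
  | [] => none
  | x :: xs => if x ≠ 0 then
      some (match pvM? xs with | none => pvT2 x | some m => min (pvT2 x) m)
    else pvM? xs

def pvOmin : Option Int → Option Int → Option Int
  | none, o => o
  | some b, none => some b
  | some b, some t => some (min b t)

theorem pvBest_eq (xs : List Int) (best : Option Int)
    (hdom : xs.all (fun y => pvDomInt y) = true) :
    pvBest xs best = pvOmin best ((pvM? xs).map (fun n => (n : Int))) := by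
  induction xs generalizing best with
  | nil => cases best <;> simp [pvBest, pvM?, pvOmin]
  | cons x xs ih =>
    simp only [List.all_cons, Bool.and_eq_true] at hdom
    rw [pvBest, pvM?]
    by_cases hx : x = 0
    · simp only [hx]; simp [ih _ hdom.2]
    · have ht : pvTwos 64 x 0 = (pvT2 x : Int) := by
        rw [pvTwos_eq 64 x 0 hx (pvT2_lt_64 x hx hdom.1)]; ring
      simp only [hx, ne_eq, not_false_eq_true, ite_true]
      rw [ih _ hdom.2, ht]
      cases best <;> cases hm : pvM? xs <;> simp [pvOmin] <;> omega

-- halving decrements pvT2 of each nonzero element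
theorem pvM?_halve (xs : List Int)
    (heven : ∀ x ∈ xs, x % 2 = 0) :
    pvM? (pvHalveAll xs) = (pvM? xs).map (· - 1) := by
  induction xs with
  | nil => simp [pvM?, pvHalveAll]
  | cons x xs ih =>
    have hxe : x % 2 = 0 := heven x (by simp)
    have ih' := ih (fun y hy => heven y (by simp [hy]))
    rw [pvHalveAll, pvM?, pvM?,
        PySem.Int.floordiv_eq_ediv_of_pos (by norm_num : (0:Int) < 2)]
    by_cases hx : x = 0
    · simp only [hx]; simpa using ih'
    · have hx2 : x / 2 ≠ 0 := by omega
      have ht2 : pvT2 x = pvT2 (x / 2) + 1 := by rw [pvT2_eq]; simp [hx, hxe]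
      simp only [hx2, hx, ne_eq, not_false_eq_true, ite_true, ih']
      cases hm : pvM? xs <;> simp [ht2] <;> omega

theorem pvM?_some (A : List Int) (h : ∃ x ∈ A, x ≠ 0) : ∃ m, pvM? A = some m := by
  induction A with
  | nil => simp at h
  | cons x xs ih =>
    rw [pvM?]
    by_cases hx : x = 0
    · subst hx
      simp only [ne_eq, not_true_eq_false, ite_false]
      apply ih
      rcases h with ⟨y, hy, hy0⟩
      rcases List.mem_cons.mp hy with h1 | h2
      · omega
      · exact ⟨y, h2, hy0⟩
    · simp [hx]

theorem pvM?_att (A : List Int) (m : Nat) (h : pvM? A = some m) :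
    ∃ x ∈ A, x ≠ 0 ∧ pvT2 x = m := by
  induction A generalizing m with
  | nil => simp [pvM?] at h
  | cons x xs ih =>
    rw [pvM?] at h
    by_cases hx : x = 0
    · subst hx
      simp only [ne_eq, not_true_eq_false, ite_false] at h
      obtain ⟨y, hy, hy0, hyt⟩ := ih m h
      exact ⟨y, by simp [hy], hy0, hyt⟩
    · cases hm : pvM? xs with
      | none =>
        rw [hm, if_pos hx] at h; simp at h
        exact ⟨x, by simp, hx, h⟩
      | some k =>
        rw [hm, if_pos hx] at h; simp at h
        rcases Nat.lt_or_ge k (pvT2 x) with hlt | hle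
        · obtain ⟨y, hy, hy0, hyt⟩ := ih k hm
          exact ⟨y, by simp [hy], hy0, by omega⟩
        · exact ⟨x, by simp, hx, by omega⟩

theorem pvM?_min (A : List Int) (m : Nat) (h : pvM? A = some m) :
    ∀ x ∈ A, x ≠ 0 → m ≤ pvT2 x := by
  induction A generalizing m with
  | nil => simp
  | cons x xs ih =>
    rw [pvM?] at h
    intro y hy hy0
    by_cases hx : x = 0
    · subst hx
      simp only [ne_eq, not_true_eq_false, ite_false] at h
      rcases List.mem_cons.mp hy with h1 | h2
      · omega
      · exact ih m h y h2 hy0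
    · cases hm : pvM? xs with
      | none =>
        rw [hm, if_pos hx] at h; simp at h
        rcases List.mem_cons.mp hy with h1 | h2
        · subst h1; omega
        · exfalso
          have := pvM?_some xs ⟨y, h2, hy0⟩
          simp [hm] at this
      | some k =>
        rw [hm, if_pos hx] at h; simp at h
        rcases List.mem_cons.mp hy with h1 | h2
        · subst h1; omega
        · have := ih k hm y h2 hy0; omega

theorem pvOuter_eq (fuel : Nat) (A : List Int) (acc : Int) (m : Nat)
    (hm : pvM? A = some m) (hf : m < fuel) :
    pvOuter fuel A acc = acc + (m : Int) := by
  induction fuel generalizing A acc m with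
  | zero => omega
  | succ f ih =>
    rw [pvOuter]
    have hall : A.all (fun x => PySem.Int.mod x 2 == 0) = true ↔ ∀ x ∈ A, x % 2 = 0 := by
      simp only [List.all_eq_true, beq_iff_eq]
      constructor <;> intro h x hx <;>
        have := h x hx <;>
        rwa [PySem.Int.mod_eq_emod_of_pos (by norm_num : (0:Int) < 2)] at * <;> omega
    match m with
    | 0 =>
      obtain ⟨x, hxm, hx0, hxt⟩ := pvM?_att A 0 hm
      have hodd : x % 2 ≠ 0 := by
        intro he
        rw [pvT2_eq] at hxt; simp [hx0, he] at hxt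
      rw [if_neg (by rw [hall]; intro h; exact hodd (h x hxm))]
      simp
    | s + 1 =>
      have heven : ∀ x ∈ A, x % 2 = 0 := by
        intro x hx
        by_cases hx0 : x = 0
        · omega
        · have := pvM?_min A (s+1) hm x hx hx0
          by_contra he
          have : pvT2 x = 0 := by rw [pvT2_eq]; simp [he]
          omega
      rw [if_pos (hall.mpr heven)]
      have hh : pvM? (pvHalveAll A) = some s := by
        rw [pvM?_halve A heven, hm]; simp
      rw [ih (pvHalveAll A) (acc + 1) s hh (by omega)]
      push_cast; ring

-- ===== VERDICT (by name: the statement is the Claim_ definition above) =====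
theorem max_oprt_spec : Claim_equal_max_oprt := by
  intro N A hdom hpre
  obtain ⟨m, hm⟩ := pvM?_some A hpre
  obtain ⟨x, hxmem, hx0, hxt⟩ := pvM?_att A m hm
  have hdomA : A.all (fun y => pvDomInt y) = true := by
    unfold Dom_max_oprt at hdom; simp_all [List.all_eq_true]
  have hxd : pvDomInt x = true := by
    rw [List.all_eq_true] at hdomA; exact hdomA x hxmem
  have hm64 : m < 64 := hxt ▸ pvT2_lt_64 x hx0 hxd
  show max_oprt N A = max_oprt_alt N A
  rw [max_oprt, max_oprt_alt, pvOuter_eq 64 A 0 m hm hm64, pvBest_eq A none hdomA, hm]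
  simp [pvOmin]
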